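-- pv_equiv track=rewrite | github.com/FabienFRX/FabienFRX | YEAR_2/Zappy/B-YEP-400-TLS-4-1-zappy-fabien.fraixanet/ZAPPY_IA/ia/src/Player/Player.py | extract_objects_from_look
-- ===== SOURCE A (Python) =====
-- def extract_objects_from_look(vision_str):
--     vision_str = vision_str.strip("[]")
--     raw_tiles = vision_str.split(",")
--     objects = {}
--     for i, item in enumerate(raw_tiles):
--         item = item.strip()
--         if item:
--             if item not in objects:
--                 objects[item] = []
--             objects[item].append(i)
--     return objects
-- ===== SOURCE B (Python) =====
-- def extract_objects_from_look(vision_str):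
--     tiles = [t.strip() for t in vision_str.strip("[]").split(",")]
--     distinct = list(dict.fromkeys(t for t in tiles if t))
--     return {tok: [i for i, x in enumerate(tiles) if x == tok] for tok in distinct}
-- ===== Notes on version B (the rewrite author's own statement) =====
-- stated objective: alternative
-- what changed: B replaces A's single accumulating dict pass with a dict comprehension over the distinct stripped tokens, rebuilding each index list by re-scanning the enumerated token list per token.
import Mathlib
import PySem

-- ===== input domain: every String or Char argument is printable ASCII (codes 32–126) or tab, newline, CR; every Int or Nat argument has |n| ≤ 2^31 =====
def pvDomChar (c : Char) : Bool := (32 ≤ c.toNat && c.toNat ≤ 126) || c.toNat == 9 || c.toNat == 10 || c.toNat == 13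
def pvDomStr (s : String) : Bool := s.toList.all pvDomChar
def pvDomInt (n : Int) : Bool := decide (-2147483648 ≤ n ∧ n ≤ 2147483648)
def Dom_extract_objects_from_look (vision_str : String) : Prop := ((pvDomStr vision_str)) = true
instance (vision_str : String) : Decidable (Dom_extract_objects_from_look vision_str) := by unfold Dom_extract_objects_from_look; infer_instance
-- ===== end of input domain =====

-- B groups indices by a dict comprehension over the distinct stripped tokens, rescanning the
-- enumerated token list once per distinct token, instead of A's single accumulating dict pass
-- (objective: alternative).

-- ===== PORT A =====
-- s.split(",") is ported as PySem.Str.split? with the nonempty literal separator ",", so the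
-- Option is always some and .getD [] is exact.
def extract_objects_from_look (vision_str : String) : List (String × List Int) :=
  let s := PySem.Str.stripChars vision_str "[]"
  let raw_tiles := (PySem.Str.split? s ",").getD []
  let objects := (PySem.List.enumerate raw_tiles 0).foldl
    (fun d p =>
      let item := PySem.Str.strip p.2
      if item ≠ "" then
        let d' := if d.contains item then d else d.insert item []
        d'.modify item [] (fun l => l ++ [p.1])
      else d)
    PySem.Dict.empty
  objects.items

-- ===== PORT B =====
def extract_objects_from_look_alt (vision_str : String) : List (String × List Int) :=
  let tiles := ((PySem.Str.split? (PySem.Str.stripChars vision_str "[]") ",").getD []).map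
    PySem.Str.strip
  let distinct := PySem.List.dedup (tiles.filter (fun t => t ≠ ""))
  distinct.map (fun tok =>
    (tok, (PySem.List.enumerate tiles 0).filterMap (fun p => if p.2 == tok then some p.1 else none)))

-- ===== PRECONDITION & SPEC =====
def Spec_extract_objects_from_look (vision_str : String) (out : List (String × List Int)) : Prop := out = extract_objects_from_look_alt vision_str
instance (vision_str : String) (out : List (String × List Int)) : Decidable (Spec_extract_objects_from_look vision_str out) := by unfold Spec_extract_objects_from_look; infer_instance

-- ===== CLAIM (what is proved, stated in full; the proofs are below) =====
def Claim_equal_extract_objects_from_look : Prop := ∀ (vision_str : String), Dom_extract_objects_from_look vision_str → Spec_extract_objects_from_look vision_str (extract_objects_from_look vision_str)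

-- ===== LEMMAS AND PROOFS =====
-- step lemma
lemma stepA_eq {d : PySem.Dict String (List Int)} {item : String} {i : Int} :
    (let d' := if d.contains item then d else d.insert item []
     d'.modify item [] (fun l => l ++ [i])) = d.modify item [] (fun l => l ++ [i]) := by
  by_cases h : d.contains item = true
  · simp [h]
  · simp only [Bool.not_eq_true] at h
    rw [if_neg (by simp [h]), PySem.Dict.modify, PySem.Dict.modify,
      PySem.Dict.getD_insert_self, PySem.Dict.insert_insert_self,
      PySem.Dict.getD_of_not_contains d [] h]

lemma enum_filter_map (g : String → String) (q : String → Bool) (ts : List String) (s : Int) :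
    ((PySem.List.enumerate ts s).filter (fun p => q (g p.2))).map (fun p => g p.2)
      = (ts.map g).filter q := by
  induction ts generalizing s with
  | nil => simp [PySem.List.enumerate_nil]
  | cons x xs ih =>
    by_cases h : q (g x) = true <;>
      simp [PySem.List.enumerate_cons, h, ih]

lemma grp_val (tok : String) (ts : List String) (s : Int) :
    (((PySem.List.enumerate ts s).filter (fun p => PySem.Str.strip p.2 == tok)).map (fun p => p.1))
      = (PySem.List.enumerate (ts.map PySem.Str.strip) s).filterMap
          (fun p => if p.2 == tok then some p.1 else none) := by
  induction ts generalizing s with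
  | nil => simp [PySem.List.enumerate_nil]
  | cons x xs ih =>
    by_cases h : PySem.Str.strip x = tok
    · simp [PySem.List.enumerate_cons, h, ih]
    · simp [PySem.List.enumerate_cons, h, ih]

lemma filter_collapse (tok : String) (htok : tok ≠ "") (l : List (Int × String)) :
    (l.filter (fun p => decide (PySem.Str.strip p.2 ≠ ""))).filter
        (fun p => PySem.Str.strip p.2 == tok)
      = l.filter (fun p => PySem.Str.strip p.2 == tok) := by
  rw [List.filter_filter]
  apply List.filter_congr
  intro p _
  by_cases h : PySem.Str.strip p.2 = tok
  · simp [h, htok]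
  · simp [h]

lemma main_lemma (ts : List String) :
    ((PySem.List.enumerate ts 0).foldl
        (fun d p =>
          let item := PySem.Str.strip p.2
          if item ≠ "" then
            let d' := if d.contains item then d else d.insert item []
            d'.modify item [] (fun l => l ++ [p.1])
          else d)
        PySem.Dict.empty).items
      = (PySem.List.dedup ((ts.map PySem.Str.strip).filter (fun t => decide (t ≠ "")))).map
          (fun tok => (tok,
            (PySem.List.enumerate (ts.map PySem.Str.strip) 0).filterMap
              (fun p => if p.2 == tok then some p.1 else none))) := by
  show (List.foldl (fun d p =>
      if PySem.Str.strip p.2 ≠ "" then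
        (if d.contains (PySem.Str.strip p.2) then d else d.insert (PySem.Str.strip p.2) []).modify
          (PySem.Str.strip p.2) [] (fun l => l ++ [p.1])
      else d) PySem.Dict.empty (PySem.List.enumerate ts 0)).items = _
  rw [show (fun (d : PySem.Dict String (List Int)) (p : Int × String) =>
      if PySem.Str.strip p.2 ≠ "" then
        (if d.contains (PySem.Str.strip p.2) then d else d.insert (PySem.Str.strip p.2) []).modify
          (PySem.Str.strip p.2) [] (fun l => l ++ [p.1])
      else d)
    = (fun d p =>
      if PySem.Str.strip p.2 ≠ "" then d.modify (PySem.Str.strip p.2) [] (fun l => l ++ [p.1]) else d)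
    from funext fun d => funext fun p => by
      by_cases h : PySem.Str.strip p.2 ≠ "" <;> simp [h, stepA_eq]]
  rw [PySem.List.foldl_ite_eq_foldl_filter (p := fun p : Int × String => PySem.Str.strip p.2 ≠ "")]
  set l₁ := (PySem.List.enumerate ts 0).filter (fun p => decide (PySem.Str.strip p.2 ≠ "")) with hl₁
  have hkeys : (l₁.foldl (fun d p => d.modify (PySem.Str.strip p.2) [] (fun l => l ++ [p.1]))
      PySem.Dict.empty).keys = PySem.Set.ofList (l₁.map (fun p => PySem.Str.strip p.2)) := by
    rw [PySem.Dict.keys_foldl_modify_key l₁ (fun p => PySem.Str.strip p.2) []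
      (fun _ p l => l ++ [p.1]) PySem.Dict.empty]
    simp [PySem.Set.update, PySem.Set.ofList, PySem.Dict.keys_empty]
  have hnodup : (l₁.foldl (fun d p => d.modify (PySem.Str.strip p.2) [] (fun l => l ++ [p.1]))
      PySem.Dict.empty).keys.Nodup :=
    PySem.Dict.nodup_keys_foldl_modify_key l₁ (fun p => PySem.Str.strip p.2) []
      (fun _ p l => l ++ [p.1]) PySem.Dict.empty (by simp [PySem.Dict.keys_empty])
  rw [PySem.Dict.items_eq_map_keys _ hnodup [], hkeys]
  rw [show l₁.map (fun p => PySem.Str.strip p.2)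
      = (ts.map PySem.Str.strip).filter (fun t => decide (t ≠ "")) from
    enum_filter_map PySem.Str.strip (fun t => decide (t ≠ "")) ts 0]
  rw [PySem.List.dedup_eq_ofList]
  apply List.map_congr_left
  intro tok hmem
  have htok : tok ≠ "" := by
    have : tok ∈ (ts.map PySem.Str.strip).filter (fun t => decide (t ≠ "")) := by
      simpa [PySem.Set.mem_ofList] using hmem
    simpa using (List.mem_filter.mp this).2
  congr 1
  have hfm : l₁.foldl (fun d p => d.modify (PySem.Str.strip p.2) [] (fun l => l ++ [p.1]))
      PySem.Dict.empty
      = (l₁.map (fun p => (PySem.Str.strip p.2, p.1))).foldl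
          (fun d q => d.modify q.1 [] (fun l => l ++ [q.2])) PySem.Dict.empty := by
    rw [List.foldl_map]
  rw [hfm, PySem.Dict.getD_foldl_modify_append, PySem.Dict.getD_empty]
  rw [List.filter_map, List.map_map]
  simp only [Function.comp_def, List.nil_append]
  rw [filter_collapse tok htok]
  simpa using grp_val tok ts 0

-- ===== VERDICT (by name: the statement is the Claim_ definition above) =====
theorem extract_objects_from_look_spec : Claim_equal_extract_objects_from_look := by
  intro vision_str _
  unfold Spec_extract_objects_from_look extract_objects_from_look extract_objects_from_look_alt
  exact main_lemma _
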